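-- pv_equiv track=rewrite | github.com/xpessoles/Informatique | Exercices/S1_02_StructuresImbriquees/10_DecoupageMontagnes/DecoupageMontagnes_corrige.py | deniveles
-- ===== SOURCE A (Python) =====
-- def deniveles(alt:list) -> list:
--     pos,neg = 0,0
--     for i in range(1,len(alt)) :
--         delta = alt[i]-alt[i-1]
--         if  delta > 0:
--             pos = pos + delta
--         else :
--             neg = neg + delta
--     return [pos,neg]
-- ===== SOURCE B (Python) =====
-- def deniveles(alt: list) -> list:
--     if len(alt) < 2:
--         return [0, 0]
--     pos = sum(b - a for a, b in zip(alt, alt[1:]) if b > a)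
--     return [pos, (alt[-1] - alt[0]) - pos]
-- ===== Notes on version B (the rewrite author's own statement) =====
-- stated objective: alternative
-- what changed: B computes only the positive-delta sum in one pass over adjacent pairs and derives the negative sum in closed form as (alt[-1]-alt[0]) - pos by telescoping, instead of accumulating both sums over indices.
import Mathlib
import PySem

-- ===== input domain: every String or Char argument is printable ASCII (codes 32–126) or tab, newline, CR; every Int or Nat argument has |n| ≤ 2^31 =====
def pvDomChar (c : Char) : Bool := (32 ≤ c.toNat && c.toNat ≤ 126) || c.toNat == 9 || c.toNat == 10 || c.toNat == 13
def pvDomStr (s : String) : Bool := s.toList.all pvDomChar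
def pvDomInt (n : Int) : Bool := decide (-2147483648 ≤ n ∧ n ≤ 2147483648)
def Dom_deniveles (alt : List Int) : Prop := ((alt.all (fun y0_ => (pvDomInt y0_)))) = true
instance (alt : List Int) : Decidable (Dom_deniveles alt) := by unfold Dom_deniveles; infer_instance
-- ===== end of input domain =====

-- B computes only the positive-delta sum in one pass over adjacent pairs and derives the
-- negative sum in closed form by telescoping; alternative decomposition, same cost.

-- ===== PORT A =====
def deniveles (alt : List Int) : List Int :=
  let p := (PySem.List.pyRange 1 (alt.length : Int) 1).foldl
    (fun (s : Int × Int) i =>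
      let delta := PySem.List.pyGetD alt i 0 - PySem.List.pyGetD alt (i - 1) 0
      if delta > 0 then (s.1 + delta, s.2) else (s.1, s.2 + delta))
    (0, 0)
  [p.1, p.2]

-- ===== PORT B =====
-- alt[-1] / alt[0] are ported as getLastD 0 / headD 0: in B they are only reached
-- when len(alt) >= 2, where both indices are in range, so this is exact.
def deniveles_alt (alt : List Int) : List Int :=
  if alt.length < 2 then [0, 0]
  else
    let pos := (((alt.zip alt.tail).filter (fun q => q.2 > q.1)).map (fun q => q.2 - q.1)).sum
    [pos, (alt.getLastD 0 - alt.headD 0) - pos]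

-- ===== PRECONDITION & SPEC =====
def Spec_deniveles (alt : List Int) (out : List Int) : Prop := out = deniveles_alt alt
instance (alt : List Int) (out : List Int) : Decidable (Spec_deniveles alt out) := by unfold Spec_deniveles; infer_instance

-- ===== CLAIM (what is proved, stated in full; the proofs are below) =====
def Claim_equal_deniveles : Prop := ∀ (alt : List Int), Dom_deniveles alt → Spec_deniveles alt (deniveles alt)

-- ===== LEMMAS AND PROOFS =====

-- A's loop body, on an already-formed (previous, current) pair
def pvF (s : Int × Int) (q : Int × Int) : Int × Int :=
  let delta := q.2 - q.1
  if delta > 0 then (s.1 + delta, s.2) else (s.1, s.2 + delta)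

def pvPos (l : List (Int × Int)) : Int :=
  ((l.filter (fun q => q.2 > q.1)).map (fun q => q.2 - q.1)).sum

def pvNeg (l : List (Int × Int)) : Int :=
  ((l.filter (fun q => ¬ q.2 > q.1)).map (fun q => q.2 - q.1)).sum

theorem pvPos_cons_pos (q : Int × Int) (t : List (Int × Int)) (h : q.1 < q.2) :
    pvPos (q :: t) = (q.2 - q.1) + pvPos t := by
  simp [pvPos, List.filter_cons, h]

theorem pvPos_cons_neg (q : Int × Int) (t : List (Int × Int)) (h : ¬ q.1 < q.2) :
    pvPos (q :: t) = pvPos t := by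
  simp [pvPos, List.filter_cons, h]

theorem pvNeg_cons_pos (q : Int × Int) (t : List (Int × Int)) (h : q.1 < q.2) :
    pvNeg (q :: t) = pvNeg t := by
  simp [pvNeg, List.filter_cons, h, show ¬ q.2 ≤ q.1 by omega]

theorem pvNeg_cons_neg (q : Int × Int) (t : List (Int × Int)) (h : ¬ q.1 < q.2) :
    pvNeg (q :: t) = (q.2 - q.1) + pvNeg t := by
  simp [pvNeg, List.filter_cons, h, show q.2 ≤ q.1 by omega]

theorem pv_fold_pairs (l : List (Int × Int)) (p n : Int) :
    l.foldl pvF (p, n) = (p + pvPos l, n + pvNeg l) := by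
  induction l generalizing p n with
  | nil => simp [pvPos, pvNeg]
  | cons q t ih =>
    by_cases h : q.2 - q.1 > 0
    · rw [List.foldl_cons, show pvF (p, n) q = (p + (q.2 - q.1), n) from by
        simp only [pvF]; rw [if_pos h], ih,
        pvPos_cons_pos q t (by omega), pvNeg_cons_pos q t (by omega), Prod.mk.injEq]
      constructor <;> ring
    · rw [List.foldl_cons, show pvF (p, n) q = (p, n + (q.2 - q.1)) from by
        simp only [pvF]; rw [if_neg h], ih,
        pvPos_cons_neg q t (by omega), pvNeg_cons_neg q t (by omega), Prod.mk.injEq]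
      constructor <;> ring

-- A's index list, mapped to (previous, current) values, is the adjacent-pair list
theorem pv_map_range (alt : List Int) :
    (PySem.List.pyRange 1 (alt.length : Int) 1).map
      (fun i => (PySem.List.pyGetD alt (i - 1) 0, PySem.List.pyGetD alt i 0))
      = alt.zip alt.tail := by
  apply List.ext_getElem
  · simp only [List.length_map, PySem.List.length_pyRange_one, List.length_zip,
      List.length_tail]
    omega
  · intro k h1 h2
    have hk : k < alt.length - 1 := by
      simpa [List.length_zip, List.length_tail] using h2
    have hr : (PySem.List.pyRange 1 (alt.length : Int) 1)[k]'(by simpa using h1) = 1 + k :=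
      PySem.List.getElem_pyRange_one _ _ _ _
    simp only [List.getElem_map, hr]
    have e1 : PySem.List.pyGetD alt ((1 : Int) + k - 1) 0 = alt[k]'(by omega) := by
      have hcast : ((1 : Int) + k - 1) = ((k : Nat) : Int) := by push_cast; ring
      rw [hcast, PySem.List.pyGetD_natCast, List.getD_eq_getElem _ _ (by omega)]
    have e2 : PySem.List.pyGetD alt ((1 : Int) + k) 0 = alt[k + 1]'(by omega) := by
      have hcast : ((1 : Int) + k) = ((k + 1 : Nat) : Int) := by push_cast; ring
      rw [hcast, PySem.List.pyGetD_natCast, List.getD_eq_getElem _ _ (by omega)]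
    have e0 : alt[k]? = some (alt[k]'(by omega)) := List.getElem?_eq_getElem (by omega)
    simp [e1, e2, e0, List.getElem_zip, List.getElem_tail]

-- telescoping: the sum of all adjacent deltas collapses to last - first
theorem pv_telescope (t : List Int) (a : Int) :
    (((a :: t).zip t).map (fun q => q.2 - q.1)).sum = t.getLastD a - a := by
  induction t generalizing a with
  | nil => simp
  | cons b t ih =>
    simp only [List.zip_cons_cons, List.map_cons, List.sum_cons, ih b, List.getLastD_cons]
    ring

-- the delta sum splits into its positive and non-positive parts
theorem pv_split (l : List (Int × Int)) :
    (l.map (fun q => q.2 - q.1)).sum = pvPos l + pvNeg l := by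
  induction l with
  | nil => simp [pvPos, pvNeg]
  | cons q t ih =>
    simp only [List.map_cons, List.sum_cons]
    by_cases h : q.1 < q.2
    · rw [pvPos_cons_pos q t h, pvNeg_cons_pos q t h, ih]; ring
    · rw [pvPos_cons_neg q t h, pvNeg_cons_neg q t h, ih]; ring

-- A's result, characterised over the adjacent-pair list
theorem pv_A_eq (alt : List Int) :
    deniveles alt = [pvPos (alt.zip alt.tail), pvNeg (alt.zip alt.tail)] := by
  have h : deniveles alt =
      (let p := ((PySem.List.pyRange 1 (alt.length : Int) 1).map
          (fun i => (PySem.List.pyGetD alt (i - 1) 0, PySem.List.pyGetD alt i 0))).foldl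
          pvF (0, 0)
       [p.1, p.2]) := by
    unfold deniveles
    rw [List.foldl_map]
    rfl
  rw [h]
  simp only [pv_map_range, pv_fold_pairs]
  simp

-- ===== VERDICT (by name: the statement is the Claim_ definition above) =====
theorem deniveles_spec : Claim_equal_deniveles := by
  intro alt _
  show deniveles alt = deniveles_alt alt
  rw [pv_A_eq]
  unfold deniveles_alt
  split_ifs with h
  · match alt, h with
    | [], _ => simp [pvPos, pvNeg]
    | [a], _ => simp [pvPos, pvNeg]
  · match alt, h with
    | a :: t, h =>
      have hsum := pv_split ((a :: t).zip t)
      have htel := pv_telescope t a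
      simp only [List.tail_cons] at *
      have hneg : pvNeg ((a :: t).zip t)
          = ((a :: t).getLastD 0 - a) - pvPos ((a :: t).zip t) := by
        rw [List.getLastD_cons]; omega
      simp [pvPos, hneg]
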